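-- pv_equiv track=rewrite | github.com/chuckinator0/Projects | scripts/completeCircularArray.py | isCompleteCircular
-- ===== SOURCE A (Python) =====
-- def isCompleteCircular(array):
--   n = len(array)
--   visited = set()
--   index = 0
--   count = 0
--   while count < n:
--     next_index = (index + array[index]) % n
--     if next_index in visited:
--       return False
--     else:
--       visited.add(next_index)
--       index = next_index
--       count += 1
--   return True
-- ===== SOURCE B (Python) =====
-- def isCompleteCircular(array):
--   n = len(array)
--   if n == 0:
--     return True
--   index = array[0] % n
--   steps = 1
--   while index != 0 and steps < n:
--     index = (index + array[index]) % n
--     steps += 1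
--   return index == 0 and steps == n
-- ===== Notes on version B (the rewrite author's own statement) =====
-- stated objective: alternative
-- what changed: B drops A's visited-set bookkeeping entirely: it follows the jumps only until the first return to index 0 (or n steps) in O(1) extra space, and returns whether that first return happens at exactly step n, relying on the theorem that the n landings of a deterministic jump map are all distinct iff the walk first returns to its start after exactly n steps.
import Mathlib
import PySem

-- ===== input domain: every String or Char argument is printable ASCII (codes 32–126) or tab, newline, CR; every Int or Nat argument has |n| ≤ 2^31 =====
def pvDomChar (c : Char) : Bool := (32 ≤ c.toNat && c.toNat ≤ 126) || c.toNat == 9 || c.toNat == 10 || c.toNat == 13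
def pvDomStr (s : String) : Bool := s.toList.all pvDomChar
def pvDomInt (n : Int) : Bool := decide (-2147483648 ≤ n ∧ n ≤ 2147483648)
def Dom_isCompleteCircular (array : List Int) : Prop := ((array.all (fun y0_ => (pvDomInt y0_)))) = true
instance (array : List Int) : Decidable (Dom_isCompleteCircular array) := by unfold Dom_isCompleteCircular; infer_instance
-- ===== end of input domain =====

-- B keeps no visited set at all: it walks only until the first return to index 0 (O(1) extra space)
-- and returns whether that first return happens at exactly step n — a first-return characterization
-- of completeness instead of A's per-step membership test.

-- ===== PORT A =====
-- while loop of A: fuel = n - count; visited and index are the loop state.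
-- The 'none' branch of pyGet? (IndexError) is unreachable because index is always 0 or a mod-n value.
def pvLoopA (array : List Int) (n : Nat) : Nat → PySem.Set Int → Int → Bool
  | 0, _, _ => true
  | fuel + 1, visited, index =>
    match PySem.List.pyGet? array index with
    | none => false
    | some v =>
      let next := PySem.Int.mod (index + v) (n : Int)
      if PySem.Set.contains visited next then false
      else pvLoopA array n fuel (PySem.Set.add visited next) next

def isCompleteCircular (array : List Int) : Bool :=
  pvLoopA array array.length array.length PySem.Set.empty 0

-- ===== PORT B =====
-- B's while loop: state (index, steps), fuel = n - steps (fuel 0 = the 'steps < n' test failing);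
-- the 'index != 0' test is the first branch. The pyGet? 'none' branch (IndexError) is unreachable.
def pvLoopB (array : List Int) (n : Nat) : Nat → Int → Nat → Int × Nat
  | 0, index, steps => (index, steps)
  | fuel + 1, index, steps =>
    if index == 0 then (index, steps)
    else
      match PySem.List.pyGet? array index with
      | none => (index, steps)
      | some v => pvLoopB array n fuel (PySem.Int.mod (index + v) (n : Int)) (steps + 1)

def isCompleteCircular_alt (array : List Int) : Bool :=
  let n := array.length
  if n == 0 then true
  else
    match PySem.List.pyGet? array 0 with
    | none => false
    | some v =>
      let r := pvLoopB array n (n - 1) (PySem.Int.mod v (n : Int)) 1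
      (r.1 == 0) && (r.2 == n)

-- ===== PRECONDITION & SPEC =====
def Spec_isCompleteCircular (array : List Int) (out : Bool) : Prop := out = isCompleteCircular_alt array
instance (array : List Int) (out : Bool) : Decidable (Spec_isCompleteCircular array out) := by unfold Spec_isCompleteCircular; infer_instance

-- ===== CLAIM (what is proved, stated in full; the proofs are below) =====
def Claim_equal_isCompleteCircular : Prop := ∀ (array : List Int), Dom_isCompleteCircular array → Spec_isCompleteCircular array (isCompleteCircular array)

-- ===== LEMMAS AND PROOFS =====

-- the jump map and its iterates starting from index 0 (proof device only)
def pvF (array : List Int) (i : Int) : Int :=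
  PySem.Int.mod (i + PySem.List.pyGetD array i 0) (array.length : Int)

def pvIter (array : List Int) : Nat → Int
  | 0 => 0
  | k + 1 => pvF array (pvIter array k)

-- the list of landing indices A's loop produces (proof device)
def pvLandings (array : List Int) (n : Nat) : Nat → Int → List Int
  | 0, _ => []
  | fuel + 1, index =>
    match PySem.List.pyGet? array index with
    | none => []
    | some v =>
      let next := PySem.Int.mod (index + v) (n : Int)
      next :: pvLandings array n fuel next

lemma pvIter_range (array : List Int) (h : 0 < array.length) :
    ∀ k, 0 ≤ pvIter array k ∧ pvIter array k < (array.length : Int) := by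
  intro k
  cases k with
  | zero =>
    refine ⟨le_refl 0, ?_⟩
    show (0 : Int) < (array.length : Int)
    exact_mod_cast h
  | succ m =>
    have hb : (0 : Int) < (array.length : Int) := by exact_mod_cast h
    exact ⟨PySem.Int.mod_nonneg _ hb, PySem.Int.mod_lt _ hb⟩

lemma pyGet?_eq_some_getD (xs : List Int) (i : Int) (h0 : 0 ≤ i) (h1 : i < (xs.length : Int)) :
    PySem.List.pyGet? xs i = some (PySem.List.pyGetD xs i 0) := by
  have ht : i.toNat < xs.length := by omega
  rw [PySem.List.pyGet?_of_nonneg xs h0, PySem.List.pyGetD_of_nonneg xs 0 h0,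
      List.getElem?_eq_getElem ht, List.getD_eq_getElem?_getD, List.getElem?_eq_getElem ht]
  rfl

lemma pvIter_succ (array : List Int) (k : Nat) :
    pvIter array (k + 1) = pvF array (pvIter array k) := rfl

lemma pvLandings_eq (array : List Int) (h : 0 < array.length) :
    ∀ (fuel k : Nat),
      pvLandings array array.length fuel (pvIter array k) =
        (List.range fuel).map (fun j => pvIter array (k + 1 + j)) := by
  intro fuel
  induction fuel with
  | zero => intro k; simp [pvLandings]
  | succ f ih =>
    intro k
    have hr := pvIter_range array h k
    simp only [pvLandings]
    rw [pyGet?_eq_some_getD array _ hr.1 hr.2]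
    simp only
    have hnext : PySem.Int.mod (pvIter array k + PySem.List.pyGetD array (pvIter array k) 0)
        (array.length : Int) = pvIter array (k + 1) := rfl
    rw [hnext, ih (k + 1), List.range_succ_eq_map, List.map_cons, List.map_map]
    refine congrArg₂ List.cons (by simp) ?_
    apply List.map_congr_left
    intro j hj
    simp only [Function.comp_apply]
    congr 1
    omega

lemma pvLoopA_iff (array : List Int) (n : Nat) :
    ∀ (fuel : Nat) (visited : PySem.Set Int) (i : Int),
      pvLoopA array n fuel visited i = true ↔
        ((pvLandings array n fuel i).length = fuel ∧
         (pvLandings array n fuel i).Nodup ∧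
         ∀ x ∈ pvLandings array n fuel i, x ∉ visited) := by
  intro fuel
  induction fuel with
  | zero => intro visited i; simp [pvLoopA, pvLandings]
  | succ k ih =>
    intro visited i
    simp only [pvLoopA, pvLandings]
    cases PySem.List.pyGet? array i with
    | none => simp
    | some v =>
      simp only
      by_cases hmem : PySem.Set.contains visited (PySem.Int.mod (i + v) (n : Int)) = true
      · rw [PySem.Set.contains_iff _ _] at hmem
        simp [hmem]
      · have hnot : PySem.Int.mod (i + v) (n : Int) ∉ visited := by
          intro h; exact hmem ((PySem.Set.contains_iff _ _).mpr h)
        rw [if_neg (by simpa using hmem)]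
        rw [ih]
        constructor
        · rintro ⟨hlen, hnd, hvis⟩
          refine ⟨by simp [hlen], ?_, ?_⟩
          · refine List.nodup_cons.mpr ⟨?_, hnd⟩
            intro hmem'
            have := hvis _ hmem'
            exact this (by simp [PySem.Set.mem_add])
          · intro x hx
            rcases List.mem_cons.mp hx with h | h
            · exact h ▸ hnot
            · intro hxv
              exact hvis x h (by simp [PySem.Set.mem_add, hxv])
        · rintro ⟨hlen, hnd, hvis⟩
          obtain ⟨hni, hnd'⟩ := List.nodup_cons.mp hnd
          refine ⟨by simpa using hlen, hnd', ?_⟩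
          intro x hx hxa
          rcases (PySem.Set.mem_add visited _ x).mp hxa with h | h
          · exact hvis x (List.mem_cons_of_mem _ hx) h
          · exact hni (h ▸ hx)

lemma nodup_map_range_iff (g : Nat → Int) (n : Nat) :
    ((List.range n).map g).Nodup ↔ ∀ i j, i < n → j < n → i < j → g i ≠ g j := by
  show ((List.range n).map g).Pairwise (· ≠ ·) ↔ _
  rw [List.pairwise_map, List.pairwise_iff_getElem]
  simp only [List.length_range, List.getElem_range]

-- A returns True iff the n landing indices are pairwise distinct
lemma A_iff (array : List Int) (h : 0 < array.length) :
    isCompleteCircular array = true ↔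
      ∀ i j, i < array.length → j < array.length → i < j →
        pvIter array (1 + i) ≠ pvIter array (1 + j) := by
  have hL : pvLandings array array.length array.length 0 =
      (List.range array.length).map (fun j => pvIter array (1 + j)) := by
    have hx := pvLandings_eq array h array.length 0
    rw [show pvIter array 0 = (0 : Int) from rfl] at hx
    rw [hx]
  unfold isCompleteCircular
  rw [pvLoopA_iff, hL]
  rw [nodup_map_range_iff]
  constructor
  · rintro ⟨-, hnd, -⟩; exact hnd
  · intro hnd
    refine ⟨by simp, hnd, ?_⟩
    intro x hx
    simp [PySem.Set.empty]

-- B's loop returns (0, n) iff the walk first returns to 0 at exactly step n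
lemma B_loop_iff (array : List Int) (h : 0 < array.length) :
    ∀ (fuel k : Nat), 1 ≤ k → k + fuel = array.length →
      ((((pvLoopB array array.length fuel (pvIter array k) k).1 == 0) &&
        ((pvLoopB array array.length fuel (pvIter array k) k).2 == array.length)) = true ↔
       (pvIter array array.length = 0 ∧
        ∀ m, k ≤ m → m < array.length → pvIter array m ≠ 0)) := by
  intro fuel
  induction fuel with
  | zero =>
    intro k hk1 hkn
    have hk : k = array.length := by omega
    subst hk
    simp only [pvLoopB, Bool.and_eq_true, beq_iff_eq, beq_self_eq_true, and_true]
    constructor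
    · intro h0; exact ⟨h0, fun m hm1 hm2 => absurd (lt_of_le_of_lt hm1 hm2) (lt_irrefl _)⟩
    · rintro ⟨h0, -⟩; exact h0
  | succ f ih =>
    intro k hk1 hkn
    have hklt : k < array.length := by omega
    by_cases hz : pvIter array k = 0
    · simp only [pvLoopB]
      rw [if_pos (by simp [hz])]
      have hkne : (k == array.length) = false := by simp; omega
      simp only [hkne, Bool.and_false]
      constructor
      · intro hcontra; cases hcontra
      · rintro ⟨-, hall⟩; exact absurd hz (hall k (le_refl k) hklt)
    · have hr := pvIter_range array h k
      simp only [pvLoopB]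
      rw [if_neg (by simp [hz])]
      rw [pyGet?_eq_some_getD array _ hr.1 hr.2]
      simp only
      have hnext : PySem.Int.mod (pvIter array k + PySem.List.pyGetD array (pvIter array k) 0)
          (array.length : Int) = pvIter array (k + 1) := rfl
      rw [hnext, ih (k + 1) (by omega) (by omega)]
      constructor
      · rintro ⟨hn0, hall⟩
        refine ⟨hn0, fun m hm1 hm2 => ?_⟩
        rcases Nat.eq_or_lt_of_le hm1 with rfl | hlt
        · exact hz
        · exact hall m hlt hm2
      · rintro ⟨hn0, hall⟩
        exact ⟨hn0, fun m hm1 hm2 => hall m (by omega) hm2⟩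

-- B returns True iff the walk first returns to 0 at exactly step n
lemma B_iff (array : List Int) (h : 0 < array.length) :
    isCompleteCircular_alt array = true ↔
      (pvIter array array.length = 0 ∧
       ∀ m, 1 ≤ m → m < array.length → pvIter array m ≠ 0) := by
  unfold isCompleteCircular_alt
  have hne : (array.length == 0) = false := beq_eq_false_iff_ne.mpr (by omega)
  simp only [hne, Bool.false_eq_true, if_false]
  rw [pyGet?_eq_some_getD array 0 (le_refl 0) (by exact_mod_cast h)]
  simp only
  have h1 : PySem.Int.mod (PySem.List.pyGetD array 0 0) (array.length : Int) =
      pvIter array 1 := by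
    rw [pvIter_succ]
    show _ = PySem.Int.mod ((0 : Int) + _) _
    rw [zero_add]
    rfl
  rw [h1]
  exact B_loop_iff array h (array.length - 1) 1 (le_refl 1) (by omega)

lemma pvIter_period (array : List Int) (a p : Nat)
    (hp : pvIter array (a + p) = pvIter array a) :
    ∀ d, pvIter array (a + d + p) = pvIter array (a + d) := by
  intro d
  induction d with
  | zero => simpa using hp
  | succ m ih =>
    have e1 : a + (m + 1) + p = (a + m + p) + 1 := by omega
    have e2 : a + (m + 1) = (a + m) + 1 := by omega
    rw [e1, e2, pvIter_succ, pvIter_succ, ih]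

lemma pvIter_period_mul (array : List Int) (a p : Nat)
    (hp : pvIter array (a + p) = pvIter array a) :
    ∀ q d, pvIter array (a + d + q * p) = pvIter array (a + d) := by
  intro q
  induction q with
  | zero => intro d; simp
  | succ m ih =>
    intro d
    have e : a + d + (m + 1) * p = a + (d + m * p) + p := by ring
    rw [e, pvIter_period array a p hp (d + m * p)]
    have e2 : a + (d + m * p) = a + d + m * p := by omega
    rw [e2, ih d]

-- the crux: the n landings are pairwise distinct iff the walk first returns to 0 at step n
lemma distinct_iff_first_return (array : List Int) (h : 0 < array.length) :
    (∀ i j, i < array.length → j < array.length → i < j →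
        pvIter array (1 + i) ≠ pvIter array (1 + j)) ↔
      (pvIter array array.length = 0 ∧
       ∀ m, 1 ≤ m → m < array.length → pvIter array m ≠ 0) := by
  constructor
  · intro hinj
    have hrange := pvIter_range array h
    have hinjOn : Set.InjOn (fun j => pvIter array (1 + j)) ↑(Finset.range array.length) := by
      intro a ha b hb hab
      simp only [Finset.coe_range, Set.mem_Iio] at ha hb
      rcases lt_trichotomy a b with hlt | heq | hgt
      · exact absurd hab (hinj a b ha hb hlt)
      · exact heq
      · exact absurd hab.symm (hinj b a hb ha hgt)
    have hcard : ((Finset.range array.length).image (fun j => pvIter array (1 + j))).card =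
        array.length := by
      rw [Finset.card_image_of_injOn hinjOn, Finset.card_range]
    have hzero : (0 : Int) ∈ (Finset.range array.length).image (fun j => pvIter array (1 + j)) := by
      by_contra h0
      have hsub : (Finset.range array.length).image (fun j => pvIter array (1 + j)) ⊆
          Finset.Ico (1 : Int) (array.length : Int) := by
        intro x hx
        rcases Finset.mem_image.mp hx with ⟨j, hj, rfl⟩
        have hr := hrange (1 + j)
        have hx0 : pvIter array (1 + j) ≠ 0 := fun e => h0 (e ▸ hx)
        simp only [Finset.mem_Ico]
        omega
      have hle := Finset.card_le_card hsub
      rw [hcard, Int.card_Ico] at hle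
      omega
    rcases Finset.mem_image.mp hzero with ⟨j, hj, hj0⟩
    rw [Finset.mem_range] at hj
    have hjn : 1 + j = array.length := by
      by_contra hne
      have hlt : 1 + j < array.length := by omega
      have hstep : pvIter array (1 + (j + 1)) = pvIter array (1 + 0) := by
        have e : 1 + (j + 1) = (1 + j) + 1 := by omega
        rw [e, pvIter_succ, hj0]
        rfl
      exact hinj 0 (j + 1) h (by omega) (by omega) hstep.symm
    refine ⟨hjn ▸ hj0, ?_⟩
    intro m hm1 hmn hm0
    refine hinj (m - 1) (array.length - 1) (by omega) (by omega) (by omega) ?_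
    rw [show 1 + (m - 1) = m by omega, show 1 + (array.length - 1) = array.length by omega,
        hm0, ← hjn, ← hj0]
  · rintro ⟨hret, hfirst⟩ i j hi hj hij heq
    have hp : pvIter array ((1 + i) + (j - i)) = pvIter array (1 + i) := by
      rw [show (1 + i) + (j - i) = 1 + j by omega]
      exact heq.symm
    have hppos : 0 < j - i := by omega
    have key := pvIter_period_mul array (1 + i) (j - i) hp
      ((array.length - (1 + i)) / (j - i)) ((array.length - (1 + i)) % (j - i))
    have hdm := Nat.div_add_mod (array.length - (1 + i)) (j - i)
    have hmul : ((array.length - (1 + i)) / (j - i)) * (j - i) =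
        (j - i) * ((array.length - (1 + i)) / (j - i)) := Nat.mul_comm _ _
    have hsum : (1 + i) + (array.length - (1 + i)) % (j - i) +
        ((array.length - (1 + i)) / (j - i)) * (j - i) = array.length := by omega
    rw [hsum] at key
    have hrlt : (array.length - (1 + i)) % (j - i) < j - i := Nat.mod_lt _ hppos
    exact hfirst ((1 + i) + (array.length - (1 + i)) % (j - i)) (by omega) (by omega)
      (by rw [← key, hret])

-- ===== VERDICT (by name: the statement is the Claim_ definition above) =====
theorem isCompleteCircular_spec : Claim_equal_isCompleteCircular := by
  intro array _
  unfold Spec_isCompleteCircular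
  cases array with
  | nil => rfl
  | cons x xs =>
    have h : 0 < (x :: xs).length := by simp
    rw [Bool.eq_iff_iff, A_iff _ h, B_iff _ h]
    exact distinct_iff_first_return _ h
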